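-- pv_equiv track=rewrite | github.com/Maarten7/advent-of-code | 2024/advent7.py | all_posible_answers_1
-- ===== SOURCE A (Python) =====
-- def all_posible_answers_1(array):
--     if len(array) == 2:
--         a, b = array
--         yield a + b
--         yield a * b
--         return
--
--     last_element = array[-1]
--     for answer in all_posible_answers_1(array[:-1]):
--         yield last_element + answer
--         yield last_element * answer
-- ===== SOURCE B (Python) =====
-- def all_posible_answers_1(array):
--     a = array[0]
--     b = array[1]
--     results = [a + b, a * b]
--     for x in array[2:]:
--         results = [v for r in results for v in (r + x, r * x)]
--     yield from results
-- ===== Notes on version B (the rewrite author's own statement) =====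
-- stated objective: simpler
-- what changed: A's right-peeling recursion on array[:-1] is replaced by a non-recursive left-to-right fold that starts from [a+b, a*b] of the first two elements and rebuilds the result list with a comprehension for each further element; same 2^(n-1) values in the same order.
import Mathlib
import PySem

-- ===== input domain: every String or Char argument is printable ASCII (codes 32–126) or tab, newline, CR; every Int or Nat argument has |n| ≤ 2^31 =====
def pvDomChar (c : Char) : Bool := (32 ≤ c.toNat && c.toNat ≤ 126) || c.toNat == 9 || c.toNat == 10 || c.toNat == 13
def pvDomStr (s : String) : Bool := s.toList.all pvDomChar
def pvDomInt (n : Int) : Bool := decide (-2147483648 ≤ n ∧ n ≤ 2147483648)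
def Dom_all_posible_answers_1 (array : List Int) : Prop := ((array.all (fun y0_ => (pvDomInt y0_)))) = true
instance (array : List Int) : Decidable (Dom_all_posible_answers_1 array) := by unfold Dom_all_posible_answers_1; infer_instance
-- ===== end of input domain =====

-- B replaces A's right-peeling recursion by a single left-to-right fold that doubles a
-- result list at each element (objective: simpler, iterative instead of recursive; same cost).
-- Both A and B are generators; the equivalence is about the sequence of yielded values.

-- ===== PORT A =====
-- A recurses on array[:-1]; on len < 2 Python raises IndexError (array[-1] / the recursive
-- call on []), returned here as [] and excluded by Pre_. The fuel argument (= array.length,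
-- strictly decreasing) is only a totality guard; it never runs out on the recursion's path.
def all_posible_answers_1_go : Nat → List Int → List Int
  | 0, _ => []
  | fuel + 1, array =>
    if array.length = 2 then
      match array with
      | [a, b] => [a + b, a * b]
      | _ => []
    else if array = [] then []  -- Python raises IndexError here; excluded by Pre_
    else
      match PySem.List.pyGet? array (-1) with
      | none => []
      | some last =>
        (all_posible_answers_1_go fuel (PySem.List.slice array none (some (-1)))).flatMap
          (fun answer => [last + answer, last * answer])

def all_posible_answers_1 (array : List Int) : List Int :=
  all_posible_answers_1_go array.length array

-- ===== PORT B =====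
-- Source B: a = array[0]; b = array[1]; results = [a+b, a*b]; fold over array[2:].
-- On len < 2 the indexing raises IndexError ([] here); excluded by Pre_.
def all_posible_answers_1_alt (array : List Int) : List Int :=
  match PySem.List.pyGet? array 0, PySem.List.pyGet? array 1 with
  | some a, some b =>
    (PySem.List.slice array (some 2) none).foldl
      (fun results x => results.flatMap (fun r => [r + x, r * x])) [a + b, a * b]
  | _, _ => []  -- IndexError for len < 2; excluded by Pre_

-- ===== PRECONDITION & SPEC =====
-- Pre_ excludes exactly the lists of length < 2, on which A (and B) raise IndexError.
def Pre_all_posible_answers_1 (array : List Int) : Prop := 2 ≤ array.length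
instance (array : List Int) : Decidable (Pre_all_posible_answers_1 array) := by
  unfold Pre_all_posible_answers_1; infer_instance
def pvWitness_all_posible_answers_1 : List Int := [1, 2, 3]

def Spec_all_posible_answers_1 (array : List Int) (out : List Int) : Prop := out = all_posible_answers_1_alt array
instance (array : List Int) (out : List Int) : Decidable (Spec_all_posible_answers_1 array out) := by unfold Spec_all_posible_answers_1; infer_instance

-- ===== CLAIM (what is proved, stated in full; the proofs are below) =====
def Claim_equal_all_posible_answers_1 : Prop := ∀ (array : List Int), Dom_all_posible_answers_1 array → Pre_all_posible_answers_1 array → Spec_all_posible_answers_1 array (all_posible_answers_1 array)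

-- ===== LEMMAS AND PROOFS =====

-- B's fold consumes one appended element as one doubling step.
lemma alt_append_cons (a b x : Int) (t : List Int) :
    all_posible_answers_1_alt ((a :: b :: t) ++ [x]) =
    (all_posible_answers_1_alt (a :: b :: t)).flatMap (fun r => [r + x, r * x]) := by
  have h1 : (0:Int) ≤ (t.length:Int) + 1 + 1 := by positivity
  have h2 : (0:Int) ≤ (t.length:Int) + 1 := by positivity
  simp [all_posible_answers_1_alt, PySem.List.pyGet?, PySem.List.pyIdx?, PySem.List.slice,
    List.take_of_length_le, List.foldl_append, h1, h2]

-- A's recursion unrolled at an appended last element (length >= 3 case).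
lemma portA_append (x : Int) (ys : List Int) (h : 2 <= ys.length) :
    all_posible_answers_1 (ys ++ [x]) =
    (all_posible_answers_1 ys).flatMap (fun r => [x + r, x * r]) := by
  show all_posible_answers_1_go (ys ++ [x]).length (ys ++ [x]) = _
  have hL : (ys ++ [x]).length = ys.length + 1 := by simp
  rw [hL, all_posible_answers_1_go]
  have hne : ys ++ [x] ≠ [] := by simp
  have hlen : (ys ++ [x]).length ≠ 2 := by simp; omega
  simp only [hlen, if_false, hne, PySem.List.pyGet?_neg_one_append_singleton,
    PySem.List.slice_to_neg_one, List.dropLast_concat]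
  · simp [all_posible_answers_1]
  · intro a b hab
    have h2 : (ys ++ [x]).length = 2 := by rw [hab]; rfl
    simp at h2
    omega

lemma agree_of_len : ∀ (ys : List Int), 2 ≤ ys.length →
    all_posible_answers_1 ys = all_posible_answers_1_alt ys := by
  intro ys
  induction ys using List.reverseRecOn with
  | nil => intro h; simp at h
  | append_singleton ys x ih =>
    intro h
    match ys, h with
    | [a], _ =>
        show all_posible_answers_1 [a, x] = all_posible_answers_1_alt [a, x]
        simp [all_posible_answers_1, all_posible_answers_1_go, all_posible_answers_1_alt,
          PySem.List.pyGet?, PySem.List.pyIdx?, PySem.List.slice]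
    | a :: b :: t, _ =>
        rw [portA_append x (a :: b :: t) (by simp), alt_append_cons,
          ih (by simp)]
        simp [Int.add_comm, Int.mul_comm]

-- ===== VERDICT (by name: the statement is the Claim_ definition above) =====
theorem all_posible_answers_1_spec : Claim_equal_all_posible_answers_1 := by
  intro array _ hpre
  unfold Spec_all_posible_answers_1
  exact agree_of_len array hpre
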